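-- pv_equiv track=rewrite | github.com/ahmedsalahacc/Converto-Image-Stringifier | src/converto.py | __genMap
-- ===== SOURCE A (Python) =====
-- def __genMap(fringe: int, start_ASCII=33) -> list:
--     '''
--     Generates a random table for the image to encode
--     using ASCII Characters
--
--     Parameters
--     ----------
--     fringe : int
--         represents the sequence of characters that will be treated
--         the same
--     start_ascii: int Default=33 (empirical choice)
--         represents the starting ASCII code to be used
--
--     Returns
--     -------
--     map : List
--         map of ASCII Encodings
--     '''
--     # generate characters for every fringe
--     MAX_IMG_VALUE = 255
--     n_chars = MAX_IMG_VALUE//fringe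
--     ASCII_map = []
--
--     for i in range(0, MAX_IMG_VALUE+1):
--         ASCII_map.append(chr(start_ASCII))
--
--         # if the fringe size is met then change the ASCII value
--         if not i % fringe:
--             start_ASCII += 1
--
--     # return the map (Note that this is irreversible operation)
--     return ASCII_map
-- ===== SOURCE B (Python) =====
-- def __genMap(fringe: int, start_ASCII=33) -> list:
--     # Closed form: entry i carries the start character shifted by the number
--     # of fringe-sized runs completed before index i.
--     return [chr(start_ASCII + (0 if i == 0 else 1 + (i - 1) // fringe))
--             for i in range(256)]
-- ===== Notes on version B (the rewrite author's own statement) =====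
-- stated objective: simpler
-- what changed: Replaces the loop that threads a mutable running ASCII counter with a per-index closed form chr(start_ASCII + (0 if i==0 else 1 + (i-1)//fringe)); Pre_ restricts to the natural domain fringe >= 1 (fringe is a run length; fringe=0 makes A raise ZeroDivisionError, and for negative fringe B's division by fringe gives other values or raises) and to start values whose 256 chr codes are valid non-surrogate code points (outside which A raises ValueError or returns lone surrogates, not Lean String values).
import Mathlib
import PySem

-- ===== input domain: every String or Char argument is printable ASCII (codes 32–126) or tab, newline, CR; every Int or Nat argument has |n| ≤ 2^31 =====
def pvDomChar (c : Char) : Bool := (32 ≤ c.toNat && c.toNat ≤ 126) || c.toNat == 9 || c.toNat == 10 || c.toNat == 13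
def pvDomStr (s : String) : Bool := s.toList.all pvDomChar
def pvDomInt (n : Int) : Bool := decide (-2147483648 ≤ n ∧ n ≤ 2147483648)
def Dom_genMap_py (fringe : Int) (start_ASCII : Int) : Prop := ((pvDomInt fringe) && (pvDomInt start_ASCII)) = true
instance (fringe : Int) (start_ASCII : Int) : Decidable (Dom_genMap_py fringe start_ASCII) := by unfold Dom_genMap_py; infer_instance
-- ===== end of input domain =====

-- B replaces A's loop-carried ASCII counter by a per-index closed form (0 for i=0, else 1 + (i-1)//fringe); same size and cost, simpler shape.


-- chr(n): exact for a valid, non-surrogate code point 0 ≤ n < 0x110000 (Pre_ keeps every code used in that range)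
def pyChr (n : Int) : String := String.ofList [Char.ofNat n.toNat]

-- ===== PORT A =====
def genMapStep (fringe : Int) (acc : List String × Int) (i : Int) : List String × Int :=
  let m := (acc.1 ++ [pyChr acc.2], acc.2)
  if PySem.Int.mod i fringe = 0 then (m.1, m.2 + 1) else m

def genMap_py (fringe : Int) (start_ASCII : Int) : List String :=
  let _n_chars := PySem.Int.floordiv 255 fringe
  ((PySem.List.pyRange 0 256 1).foldl (genMapStep fringe) ([], start_ASCII)).1

-- ===== PORT B =====
def genMap_py_alt (fringe : Int) (start_ASCII : Int) : List String :=
  (PySem.List.pyRange 0 256 1).map (fun i =>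
    pyChr (start_ASCII + (if i = 0 then 0 else 1 + PySem.Int.floordiv (i - 1) fringe)))

-- ===== PRECONDITION & SPEC =====
-- Pre_ restricts to the natural domain fringe ≥ 1: fringe is a run length, fringe = 0 makes A
-- raise ZeroDivisionError, and on negative fringe B's floor division by fringe yields other
-- values or raises. It also excludes start values for which some chr code falls outside
-- [0, 0x10FFFF] (ValueError in A) or whose code range meets the surrogate band 0xD800–0xDFFF,
-- where A returns lone-surrogate strings that are not values of the Lean String type.
def Pre_genMap_py (fringe : Int) (start_ASCII : Int) : Prop :=
  1 ≤ fringe ∧ 0 ≤ start_ASCII ∧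
  start_ASCII + 1 + ((254 / fringe.natAbs : Nat) : Int) ≤ 1114111 ∧
  (start_ASCII + 1 + ((254 / fringe.natAbs : Nat) : Int) < 55296 ∨ 57344 ≤ start_ASCII)
instance (fringe : Int) (start_ASCII : Int) : Decidable (Pre_genMap_py fringe start_ASCII) := by
  unfold Pre_genMap_py; infer_instance

def pvWitness_genMap_py : Int × Int := (30, 33)

def Spec_genMap_py (fringe : Int) (start_ASCII : Int) (out : List String) : Prop := out = genMap_py_alt fringe start_ASCII
instance (fringe : Int) (start_ASCII : Int) (out : List String) : Decidable (Spec_genMap_py fringe start_ASCII out) := by unfold Spec_genMap_py; infer_instance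

-- ===== CLAIM (what is proved, stated in full; the proofs are below) =====
def Claim_equal_genMap_py : Prop := ∀ (fringe : Int) (start_ASCII : Int), Dom_genMap_py fringe start_ASCII → Pre_genMap_py fringe start_ASCII → Spec_genMap_py fringe start_ASCII (genMap_py fringe start_ASCII)

-- ===== LEMMAS AND PROOFS =====

-- number of counter increments before index i (closed form, B's shape)
def pvCnt (k i : Nat) : Nat := if i = 0 then 0 else (i - 1) / k + 1

theorem pvCnt_succ (k n : Nat) :
    pvCnt k (n + 1) = pvCnt k n + (if k ∣ n then 1 else 0) := by
  cases n with
  | zero => simp [pvCnt]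
  | succ m =>
      simp only [pvCnt, Nat.succ_ne_zero, if_false, Nat.add_sub_cancel]
      rw [Nat.succ_div]
      by_cases h : k ∣ (m + 1) <;> simp [h]

theorem pv_mod_zero_iff (f : Int) (n : Nat) :
    PySem.Int.mod (n : Int) f = 0 ↔ f.natAbs ∣ n := by
  rw [PySem.Int.mod_eq_zero_iff_dvd]
  constructor
  · intro h; exact Int.ofNat_dvd.mp (Int.natAbs_dvd.mpr h)
  · intro h; exact Int.natAbs_dvd.mp (Int.ofNat_dvd.mpr h)

theorem pv_foldA (f s : Int) (n : Nat) :
    (PySem.List.pyRange 0 (n : Int) 1).foldl (genMapStep f) ([], s)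
      = ((List.range n).map (fun j => pyChr (s + pvCnt f.natAbs j)), s + pvCnt f.natAbs n) := by
  induction n with
  | zero => simp [PySem.List.pyRange_one_eq_nil le_rfl, pvCnt]
  | succ n ih =>
      have hcast : ((n + 1 : Nat) : Int) = (n : Int) + 1 := by push_cast; ring
      rw [hcast, PySem.List.pyRange_one_succ_right (by positivity), List.foldl_append, ih]
      simp only [List.foldl_cons, List.foldl_nil, genMapStep]
      rw [List.range_succ, List.map_append]
      by_cases h : f.natAbs ∣ n
      · rw [if_pos ((pv_mod_zero_iff f n).mpr h)]
        have := pvCnt_succ f.natAbs n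
        rw [if_pos h] at this
        simp [this]; omega
      · rw [if_neg (fun hc => h ((pv_mod_zero_iff f n).mp hc))]
        have := pvCnt_succ f.natAbs n
        rw [if_neg h] at this
        simp [this]

theorem pv_elemB (f s : Int) (hf : 1 ≤ f) (j : Nat) :
    pyChr (s + (if ((0 : Int) + (j : Nat)) = 0 then 0
                else 1 + PySem.Int.floordiv (((0 : Int) + (j : Nat)) - 1) f))
      = pyChr (s + pvCnt f.natAbs j) := by
  cases j with
  | zero => simp [pvCnt]
  | succ m =>
      have hne : ((0 : Int) + ((m + 1 : Nat) : Int)) ≠ 0 := by push_cast; omega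
      rw [if_neg hne]
      have h1 : ((0 : Int) + ((m + 1 : Nat) : Int)) - 1 = ((m : Nat) : Int) := by push_cast; ring
      have h2 : f = ((f.natAbs : Nat) : Int) := (Int.natAbs_of_nonneg (by omega)).symm
      rw [h1, h2, PySem.Int.floordiv_natCast]
      simp only [pvCnt, Nat.succ_ne_zero, if_false, Nat.add_sub_cancel]
      push_cast; ring_nf
      rw [abs_abs]

-- ===== VERDICT (by name: the statement is the Claim_ definition above) =====
theorem genMap_py_spec : Claim_equal_genMap_py := by
  intro f s _ hPre
  unfold Spec_genMap_py genMap_py genMap_py_alt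
  dsimp only
  have h256 : (256 : Int) = ((256 : Nat) : Int) := by norm_num
  rw [h256, pv_foldA f s 256, PySem.List.pyRange_one]
  simp only [Int.sub_zero, Int.toNat_natCast]
  rw [List.map_map]
  refine List.map_congr_left (fun j _ => ?_)
  simp only [Function.comp]
  exact (pv_elemB f s hPre.1 j).symm
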